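-- pv_equiv track=rewrite | github.com/ChenApr/Jedusa | my_judge/bench_mtbench_both.py | replace_or_add_arg
-- ===== SOURCE A (Python) =====
-- from typing import Dict, Any, List, Optional, Tuple
--
-- def replace_or_add_arg(argv: List[str], key: str, value: Optional[str]) -> List[str]:
--     """Replace `--key <val>` if exists; otherwise append. If value is None, remove the arg (and its value if present)."""
--     out = []
--     i = 0
--     found = False
--     while i < len(argv):
--         a = argv[i]
--         if a == key:
--             found = True
--             # skip this key and its value (if any)
--             if i + 1 < len(argv) and not argv[i + 1].startswith("--"):
--                 i += 2
--             else:
--                 i += 1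
--             if value is not None:
--                 out += [key, value]
--             continue
--         out.append(a)
--         i += 1
--     if (not found) and (value is not None):
--         out += [key, value]
--     return out
-- ===== SOURCE B (Python) =====
-- def replace_or_add_arg(argv, key, value):
--     """Two-phase rewrite: segment argv (an occurrence of key captures its
--     following non---token), then emit segments, replacing matched ones."""
--     # phase 1: segmentation
--     segs = []
--     i = 0
--     while i < len(argv):
--         if argv[i] == key and i + 1 < len(argv) and not argv[i + 1].startswith("--"):
--             segs.append((True, [argv[i], argv[i + 1]]))
--             i += 2
--         elif argv[i] == key:
--             segs.append((True, [argv[i]]))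
--             i += 1
--         else:
--             segs.append((False, [argv[i]]))
--             i += 1
--     # phase 2: emission
--     repl = [] if value is None else [key, value]
--     found = any(m for m, _ in segs)
--     out = []
--     for m, toks in segs:
--         out.extend(repl if m else toks)
--     if not found and value is not None:
--         out.extend(repl)
--     return out
-- ===== Notes on version B (the rewrite author's own statement) =====
-- stated objective: alternative
-- what changed: Replaces A's single index-juggling while loop (mutating out and found as it scans) by a two-phase pass: first group argv into (matched, tokens) segments pairing each key occurrence with its captured value token, then emit the segments, substituting the replacement for matched ones.
import Mathlib
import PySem

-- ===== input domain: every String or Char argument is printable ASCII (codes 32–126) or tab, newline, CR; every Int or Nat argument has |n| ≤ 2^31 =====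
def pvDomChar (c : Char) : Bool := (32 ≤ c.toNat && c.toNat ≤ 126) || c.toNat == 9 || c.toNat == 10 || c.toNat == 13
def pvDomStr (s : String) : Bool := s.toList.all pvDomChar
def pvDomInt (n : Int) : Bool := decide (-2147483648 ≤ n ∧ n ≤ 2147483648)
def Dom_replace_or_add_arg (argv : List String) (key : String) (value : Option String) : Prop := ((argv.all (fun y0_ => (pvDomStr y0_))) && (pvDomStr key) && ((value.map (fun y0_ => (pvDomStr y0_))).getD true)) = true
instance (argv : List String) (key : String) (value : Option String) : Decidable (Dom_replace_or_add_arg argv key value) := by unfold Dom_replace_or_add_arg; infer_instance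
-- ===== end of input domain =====

-- B is an alternative decomposition of A (same cost): a two-phase pass — segment argv, then emit segments.

-- ===== PORT A =====
-- A's while loop: index i, accumulator out, flag found; advances by 2 when a key
-- occurrence captures its following non-'--' token, else by 1.
def pvLoopA (argv : List String) (key : String) (value : Option String) (i : Nat) (out : List String) (found : Bool) : List String × Bool :=
  if _h : i < argv.length then
    let a := (argv[i]?).getD ""
    if a == key then
      if i + 1 < argv.length ∧ ¬ PySem.Str.startswith ((argv[i+1]?).getD "") "--" then
        pvLoopA argv key value (i + 2)
          (out ++ (match value with | some v => [key, v] | none => [])) true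
      else
        pvLoopA argv key value (i + 1)
          (out ++ (match value with | some v => [key, v] | none => [])) true
    else
      pvLoopA argv key value (i + 1) (out ++ [a]) found
  else (out, found)
termination_by argv.length - i

def replace_or_add_arg (argv : List String) (key : String) (value : Option String) : List String :=
  let r := pvLoopA argv key value 0 [] false
  if (!r.2) && value.isSome then
    r.1 ++ (match value with | some v => [key, v] | none => [])
  else r.1

-- ===== PORT B =====
-- phase 1 of Source B: group argv into (matched, tokens) segments
def pvSegsB (argv : List String) (key : String) (i : Nat) : List (Bool × List String) :=
  if _h : i < argv.length then
    if (argv[i]?).getD "" == key ∧ i + 1 < argv.length ∧ ¬ PySem.Str.startswith ((argv[i+1]?).getD "") "--" then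
      (true, [(argv[i]?).getD "", (argv[i+1]?).getD ""]) :: pvSegsB argv key (i + 2)
    else if (argv[i]?).getD "" == key then
      (true, [(argv[i]?).getD ""]) :: pvSegsB argv key (i + 1)
    else
      (false, [(argv[i]?).getD ""]) :: pvSegsB argv key (i + 1)
  else []
termination_by argv.length - i

-- phase 2 of Source B: emission
def replace_or_add_arg_alt (argv : List String) (key : String) (value : Option String) : List String :=
  let segs := pvSegsB argv key 0
  let repl : List String := match value with | none => [] | some v => [key, v]
  let found := segs.any (fun s => s.1)
  let out := segs.foldl (fun acc s => acc ++ (if s.1 then repl else s.2)) []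
  if (!found) && value.isSome then out ++ repl else out

-- ===== PRECONDITION & SPEC =====
def Spec_replace_or_add_arg (argv : List String) (key : String) (value : Option String) (out : List String) : Prop := out = replace_or_add_arg_alt argv key value
instance (argv : List String) (key : String) (value : Option String) (out : List String) : Decidable (Spec_replace_or_add_arg argv key value out) := by unfold Spec_replace_or_add_arg; infer_instance

-- ===== CLAIM (what is proved, stated in full; the proofs are below) =====
def Claim_equal_replace_or_add_arg : Prop := ∀ (argv : List String) (key : String) (value : Option String), Dom_replace_or_add_arg argv key value → Spec_replace_or_add_arg argv key value (replace_or_add_arg argv key value)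

-- ===== LEMMAS AND PROOFS =====

-- A's loop, started at index i with accumulator (out, found), computes exactly the
-- flattened emission of B's segments from i, and found ∨ (some segment matched).
theorem pvLoopA_eq_segs (argv : List String) (key : String) (value : Option String) :
    ∀ n i out found, argv.length - i ≤ n →
      pvLoopA argv key value i out found =
        (out ++ (pvSegsB argv key i).flatMap
            (fun s => if s.1 then (match value with | none => [] | some v => [key, v]) else s.2),
         found || (pvSegsB argv key i).any (fun s => s.1)) := by
  intro n
  induction n with
  | zero =>
    intro i out found hle
    rw [pvLoopA.eq_def, pvSegsB.eq_def]
    have : ¬ i < argv.length := by omega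
    simp [this]
  | succ n ih =>
    intro i out found hle
    rw [pvLoopA.eq_def, pvSegsB.eq_def]
    by_cases h : i < argv.length
    · simp only [h, dite_true]
      by_cases hk : (argv[i]?).getD "" == key
      · by_cases hp : i + 1 < argv.length ∧ ¬ PySem.Str.startswith ((argv[i+1]?).getD "") "--"
        · simp only [hk, if_true, hp]
          rw [ih (i + 2) _ true (by omega)]
          cases value <;> simp
        · simp only [hk, if_true, hp]
          rw [ih (i + 1) _ true (by omega)]
          cases value <;> simp
      · simp only [hk]
        rw [ih (i + 1) _ found (by omega)]
        simp
    · simp [h]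

-- ===== VERDICT (by name: the statement is the Claim_ definition above) =====
theorem replace_or_add_arg_spec : Claim_equal_replace_or_add_arg := by
  intro argv key value _
  unfold Spec_replace_or_add_arg replace_or_add_arg replace_or_add_arg_alt
  rw [pvLoopA_eq_segs argv key value (argv.length) 0 [] false (by omega)]
  simp only [PySem.List.foldl_append_eq_flatMap]
  cases value <;> simp only [Bool.false_or]
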